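-- pv_equiv track=rewrite | github.com/javokhirbek1999/Educative | Learning-Paths/Ace-the-Python-Coding-Interview/Dynamic-Programming/Find-Combinations-for-Game-Scoring.py | scoring_options
-- ===== SOURCE A (Python) =====
-- def scoring_options(n):
--
--   dp = [1] * (n+1)
--
--
--   sum1 = sum2 = sum3 = 0
--
--   for current_index in range(1, n+1):
--
--     sum1 = 0 if current_index-1 < 0 else dp[current_index-1]
--     sum2 = 0 if current_index-2 < 0 else dp[current_index-2]
--     sum3 = 0 if current_index-4 < 0 else dp[current_index-4]
--
--     dp[current_index] = sum1+sum2+sum3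
--
--   return dp[n]
-- ===== SOURCE B (Python) =====
-- # Matrix exponentiation of the recurrence f(k) = f(k-1) + f(k-2) + f(k-4):
-- # f(n) is the top-left entry of M^n, computed by binary exponentiation in O(log n).
--
-- _I4 = ((1, 0, 0, 0),
--        (0, 1, 0, 0),
--        (0, 0, 1, 0),
--        (0, 0, 0, 1))
--
-- _M = ((1, 1, 0, 1),
--       (1, 0, 0, 0),
--       (0, 1, 0, 0),
--       (0, 0, 1, 0))
--
--
-- def _mat_mul(A, B):
--     (a00, a01, a02, a03), (a10, a11, a12, a13), (a20, a21, a22, a23), (a30, a31, a32, a33) = A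
--     (b00, b01, b02, b03), (b10, b11, b12, b13), (b20, b21, b22, b23), (b30, b31, b32, b33) = B
--     return ((a00*b00 + a01*b10 + a02*b20 + a03*b30,
--              a00*b01 + a01*b11 + a02*b21 + a03*b31,
--              a00*b02 + a01*b12 + a02*b22 + a03*b32,
--              a00*b03 + a01*b13 + a02*b23 + a03*b33),
--             (a10*b00 + a11*b10 + a12*b20 + a13*b30,
--              a10*b01 + a11*b11 + a12*b21 + a13*b31,
--              a10*b02 + a11*b12 + a12*b22 + a13*b32,
--              a10*b03 + a11*b13 + a12*b23 + a13*b33),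
--             (a20*b00 + a21*b10 + a22*b20 + a23*b30,
--              a20*b01 + a21*b11 + a22*b21 + a23*b31,
--              a20*b02 + a21*b12 + a22*b22 + a23*b32,
--              a20*b03 + a21*b13 + a22*b23 + a23*b33),
--             (a30*b00 + a31*b10 + a32*b20 + a33*b30,
--              a30*b01 + a31*b11 + a32*b21 + a33*b31,
--              a30*b02 + a31*b12 + a32*b22 + a33*b32,
--              a30*b03 + a31*b13 + a32*b23 + a33*b33))
--
--
-- def _mat_pow(M, e):
--     if e == 0:
--         return _I4
--     H = _mat_pow(M, e // 2)
--     H2 = _mat_mul(H, H)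
--     if e % 2 == 0:
--         return H2
--     return _mat_mul(H2, M)
--
--
-- def scoring_options(n):
--     if n < 0:
--         return 0
--     return _mat_pow(_M, n)[0][0]
-- ===== Notes on version B (the rewrite author's own statement) =====
-- stated objective: faster
-- what changed: Replaced A's O(n) dynamic-programming table over all scores with binary matrix exponentiation of the linear recurrence f(k)=f(k-1)+f(k-2)+f(k-4), reading the answer off the top-left entry of the 4x4 companion matrix raised to the n-th power.
import Mathlib
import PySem

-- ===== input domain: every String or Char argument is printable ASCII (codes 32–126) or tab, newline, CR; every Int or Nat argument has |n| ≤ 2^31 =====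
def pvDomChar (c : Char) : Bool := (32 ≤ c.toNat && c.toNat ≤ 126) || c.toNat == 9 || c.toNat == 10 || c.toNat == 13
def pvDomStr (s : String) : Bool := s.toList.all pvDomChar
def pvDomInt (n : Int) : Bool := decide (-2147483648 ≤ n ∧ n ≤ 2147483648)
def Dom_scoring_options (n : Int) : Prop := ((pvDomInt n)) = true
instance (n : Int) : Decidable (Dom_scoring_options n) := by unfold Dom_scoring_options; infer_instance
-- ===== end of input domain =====

-- B replaces A's O(n) dynamic-programming loop by binary matrix exponentiation of the
-- linear recurrence f(k)=f(k-1)+f(k-2)+f(k-4) (O(log n) multiplications).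


-- ===== PORT A =====
-- [1]*(n+1): Python's list repetition gives [] for n+1 ≤ 0, matched by toNat's clamp.
def scoring_options (n : Int) : Int :=
  let dp := List.replicate ((n+1).toNat) (1:Int)
  let dp := (PySem.List.pyRange 1 (n+1) 1).foldl
    (fun dp current_index =>
      let sum1 := if current_index - 1 < 0 then 0 else PySem.List.pyGetD dp (current_index-1) 0
      let sum2 := if current_index - 2 < 0 then 0 else PySem.List.pyGetD dp (current_index-2) 0
      let sum3 := if current_index - 4 < 0 then 0 else PySem.List.pyGetD dp (current_index-4) 0
      PySem.List.pySetD dp current_index (sum1+sum2+sum3)) dp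
  PySem.List.pyGetD dp n 0

-- ===== PORT B =====
-- 4×4 integer matrix, entries row-major (Python's nested 4-tuples).
structure Mat4 where
  (m00 m01 m02 m03 m10 m11 m12 m13 m20 m21 m22 m23 m30 m31 m32 m33 : Int)
deriving DecidableEq, Repr

def matI : Mat4 := ⟨1,0,0,0, 0,1,0,0, 0,0,1,0, 0,0,0,1⟩

def matM : Mat4 := ⟨1,1,0,1, 1,0,0,0, 0,1,0,0, 0,0,1,0⟩

def matMul (A B : Mat4) : Mat4 :=
  ⟨A.m00*B.m00 + A.m01*B.m10 + A.m02*B.m20 + A.m03*B.m30,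
   A.m00*B.m01 + A.m01*B.m11 + A.m02*B.m21 + A.m03*B.m31,
   A.m00*B.m02 + A.m01*B.m12 + A.m02*B.m22 + A.m03*B.m32,
   A.m00*B.m03 + A.m01*B.m13 + A.m02*B.m23 + A.m03*B.m33,
   A.m10*B.m00 + A.m11*B.m10 + A.m12*B.m20 + A.m13*B.m30,
   A.m10*B.m01 + A.m11*B.m11 + A.m12*B.m21 + A.m13*B.m31,
   A.m10*B.m02 + A.m11*B.m12 + A.m12*B.m22 + A.m13*B.m32,
   A.m10*B.m03 + A.m11*B.m13 + A.m12*B.m23 + A.m13*B.m33,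
   A.m20*B.m00 + A.m21*B.m10 + A.m22*B.m20 + A.m23*B.m30,
   A.m20*B.m01 + A.m21*B.m11 + A.m22*B.m21 + A.m23*B.m31,
   A.m20*B.m02 + A.m21*B.m12 + A.m22*B.m22 + A.m23*B.m32,
   A.m20*B.m03 + A.m21*B.m13 + A.m22*B.m23 + A.m23*B.m33,
   A.m30*B.m00 + A.m31*B.m10 + A.m32*B.m20 + A.m33*B.m30,
   A.m30*B.m01 + A.m31*B.m11 + A.m32*B.m21 + A.m33*B.m31,
   A.m30*B.m02 + A.m31*B.m12 + A.m32*B.m22 + A.m33*B.m32,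
   A.m30*B.m03 + A.m31*B.m13 + A.m32*B.m23 + A.m33*B.m33⟩

-- binary exponentiation (e // 2 recursion), as in Source B's _mat_pow
def matPow (M : Mat4) (e : Nat) : Mat4 :=
  if h : e = 0 then matI
  else
    let H := matPow M (e / 2)
    let H2 := matMul H H
    if e % 2 = 0 then H2 else matMul H2 M
termination_by e
decreasing_by exact Nat.div_lt_self (Nat.pos_of_ne_zero h) (by omega)

def scoring_options_alt (n : Int) : Int :=
  if n < 0 then 0 else (matPow matM n.toNat).m00

-- ===== PRECONDITION & SPEC =====
-- A raises IndexError for every n < 0 (dp[n] on a too-short/empty list); Pre_ excludes exactly those.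
def Pre_scoring_options (n : Int) : Prop := 0 ≤ n
instance (n : Int) : Decidable (Pre_scoring_options n) := by unfold Pre_scoring_options; infer_instance
def pvWitness_scoring_options : Int := 5

def Spec_scoring_options (n : Int) (out : Int) : Prop := out = scoring_options_alt n
instance (n : Int) (out : Int) : Decidable (Spec_scoring_options n out) := by unfold Spec_scoring_options; infer_instance

-- ===== CLAIM (what is proved, stated in full; the proofs are below) =====
def Claim_equal_scoring_options : Prop := ∀ (n : Int), Dom_scoring_options n → Pre_scoring_options n → Spec_scoring_options n (scoring_options n)

-- ===== LEMMAS AND PROOFS =====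

-- reference state: row 0 of M^k under the row-vector evolution (a,b,c,d) ↦ (a+b, a+c, d, a)
def refS : Nat → Int × Int × Int × Int
  | 0 => (1, 0, 0, 0)
  | k+1 => ((refS k).1 + (refS k).2.1, (refS k).1 + (refS k).2.2.1, (refS k).2.2.2, (refS k).1)

def refF (k : Nat) : Int := (refS k).1

lemma refF_rec4 (k : Nat) : refF (k+4) = refF (k+3) + refF (k+2) + refF k := by
  simp only [refF, refS]; ring

-- naive power, the bridge between binary exponentiation and the recurrence
def npow : Nat → Mat4
  | 0 => matI
  | k+1 => matMul (npow k) matM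

lemma matMul_assoc (A B C : Mat4) : matMul (matMul A B) C = matMul A (matMul B C) := by
  cases A; cases B; cases C
  simp only [matMul, Mat4.mk.injEq]
  and_intros <;> ring

lemma npowM_add (a b : Nat) : matMul (npow a) (npow b) = npow (a + b) := by
  induction b with
  | zero =>
    cases h : npow a
    simp [npow, matI, matMul]
  | succ b ih =>
    show matMul (npow a) (matMul (npow b) matM) = npow (a + b + 1)
    rw [← matMul_assoc, ih]; rfl

lemma matPow_eq_npow (e : Nat) : matPow matM e = npow e := by
  induction e using Nat.strong_induction_on with
  | _ e ih =>
    rw [matPow]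
    by_cases h : e = 0
    · simp [h, npow]
    · simp only [h, dite_false]
      have ih2 := ih (e / 2) (Nat.div_lt_self (Nat.pos_of_ne_zero h) (by omega))
      by_cases hp : e % 2 = 0
      · simp only [hp, if_true, ih2]
        rw [npowM_add]; congr 1; omega
      · simp only [hp, if_false, ih2]
        rw [npowM_add]
        have : e / 2 + e / 2 + 1 = e := by omega
        rw [show matMul (npow (e / 2 + e / 2)) matM = npow (e / 2 + e / 2 + 1) from rfl, this]

lemma npow_row0 (k : Nat) :
    ((npow k).m00, (npow k).m01, (npow k).m02, (npow k).m03) = refS k := by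
  induction k with
  | zero => rfl
  | succ k ih =>
    have h0 : (npow k).m00 = (refS k).1 := congrArg (·.1) ih
    have h1 : (npow k).m01 = (refS k).2.1 := congrArg (·.2.1) ih
    have h2 : (npow k).m02 = (refS k).2.2.1 := congrArg (·.2.2.1) ih
    have h3 : (npow k).m03 = (refS k).2.2.2 := congrArg (·.2.2.2) ih
    simp only [npow, matMul, matM, refS, h0, h1, h2, h3, Prod.mk.injEq]
    and_intros <;> ring

lemma alt_eq_refF (n : Int) (hn : 0 ≤ n) : scoring_options_alt n = refF n.toNat := by
  have : ¬ n < 0 := by omega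
  simp only [scoring_options_alt, this, if_false, matPow_eq_npow]
  exact congrArg (·.1) (npow_row0 n.toNat)

-- A-side: the loop body, Nat-indexed
def stepA (dp : List Int) (ci : Int) : List Int :=
  let sum1 := if ci - 1 < 0 then 0 else PySem.List.pyGetD dp (ci-1) 0
  let sum2 := if ci - 2 < 0 then 0 else PySem.List.pyGetD dp (ci-2) 0
  let sum3 := if ci - 4 < 0 then 0 else PySem.List.pyGetD dp (ci-4) 0
  PySem.List.pySetD dp ci (sum1+sum2+sum3)

def dpAt (N m : Nat) : List Int :=
  (PySem.List.pyRange 1 ((m:Int)+1) 1).foldl stepA (List.replicate (N+1) (1:Int))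

lemma refF_succ (m : Nat) :
    refF (m+1) = refF m + (if m = 0 then 0 else refF (m-1)) + (if m < 3 then 0 else refF (m-3)) := by
  match m with
  | 0 => decide
  | 1 => decide
  | 2 => decide
  | j+3 =>
    have h0 : ¬(j+3 = 0) := by omega
    have h1 : ¬(j+3 < 3) := by omega
    simp only [h0, h1, if_false]
    exact refF_rec4 j

lemma dpAt_invariant (N : Nat) : ∀ m, m ≤ N →
    (dpAt N m).length = N + 1 ∧
    ∀ k : Nat, k ≤ N →
      PySem.List.pyGetD (dpAt N m) (k:Int) 0 = if k ≤ m then refF k else 1 := by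
  intro m
  induction m with
  | zero =>
    intro _
    have hnil : PySem.List.pyRange 1 ((0:Int)+1) 1 = [] := PySem.List.pyRange_one_eq_nil (by omega)
    constructor
    · simp only [dpAt, Nat.cast_zero, hnil, List.foldl_nil, List.length_replicate]
    · intro k hk
      simp only [dpAt, Nat.cast_zero, hnil, List.foldl_nil, PySem.List.pyGetD_natCast]
      rw [List.getD_eq_getElem _ _ (by simp; omega)]
      simp only [List.getElem_replicate]
      rcases Nat.eq_zero_or_pos k with h | h
      · subst h; simp [refF, refS]
      · have : ¬(k ≤ 0) := by omega
        simp [this]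
  | succ m ih =>
    intro hm1
    obtain ⟨hlen, hget⟩ := ih (by omega)
    have hrange : PySem.List.pyRange 1 (((m+1:Nat):Int)+1) 1
        = PySem.List.pyRange 1 ((m:Int)+1) 1 ++ [(m:Int)+1] := by
      have e : ((m+1:Nat):Int)+1 = ((m:Int)+1)+1 := by push_cast; ring
      rw [e, PySem.List.pyRange_one_succ_right (by omega)]
    have hdp : dpAt N (m+1) = stepA (dpAt N m) ((m:Int)+1) := by
      unfold dpAt
      rw [hrange, List.foldl_append, List.foldl_cons, List.foldl_nil]
    -- evaluate the three guarded reads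
    have hs1 : (if ((m:Int)+1) - 1 < 0 then 0 else PySem.List.pyGetD (dpAt N m) (((m:Int)+1)-1) 0)
        = refF m := by
      have c1 : ¬(((m:Int)+1) - 1 < 0) := by omega
      have e1 : ((m:Int)+1) - 1 = ((m:Nat):Int) := by ring
      rw [if_neg c1, e1, hget m (by omega), if_pos (le_refl m)]
    have hs2 : (if ((m:Int)+1) - 2 < 0 then 0 else PySem.List.pyGetD (dpAt N m) (((m:Int)+1)-2) 0)
        = (if m = 0 then 0 else refF (m-1)) := by
      by_cases h0 : m = 0
      · subst h0; norm_num
      · have c2 : ¬(((m:Int)+1) - 2 < 0) := by omega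
        have e2 : ((m:Int)+1) - 2 = ((m-1:Nat):Int) := by omega
        rw [if_neg c2, e2, hget (m-1) (by omega), if_pos (by omega), if_neg h0]
    have hs3 : (if ((m:Int)+1) - 4 < 0 then 0 else PySem.List.pyGetD (dpAt N m) (((m:Int)+1)-4) 0)
        = (if m < 3 then 0 else refF (m-3)) := by
      by_cases h3 : m < 3
      · have c3 : ((m:Int)+1) - 4 < 0 := by omega
        rw [if_pos c3, if_pos h3]
      · have c3 : ¬(((m:Int)+1) - 4 < 0) := by omega
        have e3 : ((m:Int)+1) - 4 = ((m-3:Nat):Int) := by omega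
        rw [if_neg c3, e3, hget (m-3) (by omega), if_pos (by omega), if_neg h3]
    have hstep : dpAt N (m+1) = PySem.List.pySetD (dpAt N m) ((m:Int)+1) (refF (m+1)) := by
      rw [hdp]
      show PySem.List.pySetD (dpAt N m) ((m:Int)+1)
          ((if ((m:Int)+1) - 1 < 0 then 0 else PySem.List.pyGetD (dpAt N m) (((m:Int)+1)-1) 0)
           + (if ((m:Int)+1) - 2 < 0 then 0 else PySem.List.pyGetD (dpAt N m) (((m:Int)+1)-2) 0)
           + (if ((m:Int)+1) - 4 < 0 then 0 else PySem.List.pyGetD (dpAt N m) (((m:Int)+1)-4) 0))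
          = _
      rw [hs1, hs2, hs3, ← refF_succ m]
    have ecast : ((m:Int)+1) = ((m+1:Nat):Int) := by push_cast; ring
    have hlt : m + 1 < (dpAt N m).length := by omega
    constructor
    · rw [hstep, ecast, PySem.List.pySetD_natCast, List.length_set, hlen]
    · intro k hk
      rw [hstep, ecast, PySem.List.pyGetD_pySetD_natCast (dpAt N m) (m+1) k _ 0 hlt]
      by_cases hkm : k = m+1
      · subst hkm
        simp
      · rw [if_neg hkm, hget k hk]
        by_cases hkle : k ≤ m
        · rw [if_pos hkle, if_pos (by omega)]
        · rw [if_neg hkle, if_neg (by omega)]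

lemma a_eq_refF (n : Int) (hn : 0 ≤ n) : scoring_options n = refF n.toNat := by
  obtain ⟨N, rfl⟩ : ∃ N : Nat, n = (N:Int) := ⟨n.toNat, (Int.toNat_of_nonneg hn).symm⟩
  have e1 : ((N:Int)+1).toNat = N + 1 := by omega
  show PySem.List.pyGetD
      ((PySem.List.pyRange 1 ((N:Int)+1) 1).foldl stepA (List.replicate (((N:Int)+1).toNat) 1))
      (N:Int) 0 = refF ((N:Int)).toNat
  rw [e1]
  have := (dpAt_invariant N N (le_refl N)).2 N (le_refl N)
  unfold dpAt at this
  rw [this, if_pos (le_refl N), Int.toNat_natCast]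

-- ===== VERDICT (by name: the statement is the Claim_ definition above) =====
theorem scoring_options_spec : Claim_equal_scoring_options := by
  intro n _ hpre
  unfold Spec_scoring_options
  rw [a_eq_refF n hpre, alt_eq_refF n hpre]
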